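-- pv_equiv track=rewrite | github.com/phamminhanhdhbk/Basic-Python-2023-100-example- | Thang 5/Exercise 6 Người ta định nghĩa một list số nguyên được gọi là “dạng sóng” khi tất cả các phần tử đều lớn hơn hoặc nhỏ hơn hai phần tử xung quanh nó. Nhập vào một list số nguyên L và kiểm tra xem/index.py | check_wave_list
-- ===== SOURCE A (Python) =====
-- def check_wave_list(lst):
--     if len(lst) < 3:
--         return False  # A wave list requires at least 3 elements
--     for i in range(1, len(lst) - 1):
--         if (lst[i] <= lst[i-1] and lst[i] <= lst[i+1]) or (lst[i] >= lst[i-1] and lst[i] >= lst[i+1]):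
--             continue
--         else:
--             return False
--     return True
-- ===== SOURCE B (Python) =====
-- def check_wave_list(lst):
--     # Wave <=> the list contains no strictly monotone run of length 3:
--     # an interior element fails the extremum test exactly when its triple is
--     # strictly increasing or strictly decreasing.  So scan once, maintaining
--     # the lengths of the current strictly-increasing and strictly-decreasing
--     # runs, and fail as soon as either run reaches 3.
--     if len(lst) < 3:
--         return False
--     inc = dec = 1
--     prev = lst[0]
--     for x in lst[1:]:
--         inc = inc + 1 if x > prev else 1
--         dec = dec + 1 if x < prev else 1
--         if inc >= 3 or dec >= 3:
--             return False
--         prev = x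
--     return True
-- ===== Notes on version B (the rewrite author's own statement) =====
-- stated objective: alternative
-- what changed: Replaces A's per-element two-neighbour extremum test over indices by a single stateful run-length scan: a wave is exactly a list with no strictly monotone run of length 3, so B tracks the current strictly-increasing and strictly-decreasing run lengths and fails the moment either reaches 3.
import Mathlib
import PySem

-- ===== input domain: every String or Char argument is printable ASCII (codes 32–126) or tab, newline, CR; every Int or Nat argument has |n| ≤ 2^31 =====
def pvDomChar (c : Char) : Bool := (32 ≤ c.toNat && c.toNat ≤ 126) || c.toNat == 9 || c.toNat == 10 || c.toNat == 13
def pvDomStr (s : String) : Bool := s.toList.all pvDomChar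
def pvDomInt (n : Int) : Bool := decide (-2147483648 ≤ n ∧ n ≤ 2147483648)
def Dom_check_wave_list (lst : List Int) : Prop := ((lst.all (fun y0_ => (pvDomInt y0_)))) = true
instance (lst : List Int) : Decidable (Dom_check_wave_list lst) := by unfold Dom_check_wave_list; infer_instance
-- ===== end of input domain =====

-- B replaces A's per-index two-neighbour extremum test by a stateful run-length scan
-- (a wave = no strictly monotone run of length 3); alternative decomposition, same O(n).

-- ===== PORT A =====
-- the for-loop with `continue`/`return False`; all indices i-1, i, i+1 are in range,
-- so pyGetD's default 0 is never used (exact to Python's lst[i])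
def checkWaveLoopA (lst : List Int) : List Int → Bool
  | [] => true
  | i :: rest =>
    if (PySem.List.pyGetD lst i 0 ≤ PySem.List.pyGetD lst (i-1) 0 ∧
        PySem.List.pyGetD lst i 0 ≤ PySem.List.pyGetD lst (i+1) 0) ∨
       (PySem.List.pyGetD lst i 0 ≥ PySem.List.pyGetD lst (i-1) 0 ∧
        PySem.List.pyGetD lst i 0 ≥ PySem.List.pyGetD lst (i+1) 0)
    then checkWaveLoopA lst rest
    else false

def check_wave_list (lst : List Int) : Bool :=
  if PySem.List.len lst < 3 then false
  else checkWaveLoopA lst (PySem.List.pyRange 1 (PySem.List.len lst - 1) 1)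

-- ===== PORT B =====
-- Source B's loop: prev = lst[0], then for x in lst[1:] update the strictly-increasing
-- and strictly-decreasing run lengths, returning False when one reaches 3
def waveRunB (prev inc dec : Int) : List Int → Bool
  | [] => true
  | x :: rest =>
    let inc' := if x > prev then inc + 1 else 1
    let dec' := if x < prev then dec + 1 else 1
    if inc' ≥ 3 ∨ dec' ≥ 3 then false
    else waveRunB x inc' dec' rest

def check_wave_list_alt (lst : List Int) : Bool :=
  if PySem.List.len lst < 3 then false
  else
    match lst with
    | [] => false            -- unreachable: len ≥ 3
    | p :: rest => waveRunB p 1 1 rest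

-- ===== PRECONDITION & SPEC =====
def Spec_check_wave_list (lst : List Int) (out : Bool) : Prop := out = check_wave_list_alt lst
instance (lst : List Int) (out : Bool) : Decidable (Spec_check_wave_list lst out) := by unfold Spec_check_wave_list; infer_instance

-- ===== CLAIM =====
def Claim_equal_check_wave_list : Prop := ∀ (lst : List Int), Dom_check_wave_list lst → Spec_check_wave_list lst (check_wave_list lst)

-- ===== LEMMAS AND PROOFS =====

-- proof-side recursive triple predicate both ports are reduced to
def triOK : List Int → Bool
  | a :: b :: c :: r => (decide ((b ≤ a ∧ b ≤ c) ∨ (a ≤ b ∧ c ≤ b))) && triOK (b :: c :: r)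
  | _ => true

-- A's early-return loop over a list of indices is `all` of its branch condition
theorem checkWaveLoopA_eq_all (lst : List Int) (r : List Int) :
    checkWaveLoopA lst r = r.all (fun i =>
      decide ((PySem.List.pyGetD lst i 0 ≤ PySem.List.pyGetD lst (i-1) 0 ∧
               PySem.List.pyGetD lst i 0 ≤ PySem.List.pyGetD lst (i+1) 0) ∨
              (PySem.List.pyGetD lst i 0 ≥ PySem.List.pyGetD lst (i-1) 0 ∧
               PySem.List.pyGetD lst i 0 ≥ PySem.List.pyGetD lst (i+1) 0))) := by
  induction r with
  | nil => rfl
  | cons i rest ih =>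
    simp only [checkWaveLoopA, List.all_cons]
    split_ifs with h <;> simp [h, ih]

-- index characterisation of triOK
theorem triOK_iff (lst : List Int) :
    triOK lst = true ↔ ∀ (i : Nat) (h : i + 2 < lst.length),
      ((lst[i+1] ≤ lst[i] ∧ lst[i+1] ≤ lst[i+2]) ∨ (lst[i] ≤ lst[i+1] ∧ lst[i+2] ≤ lst[i+1])) := by
  match lst with
  | [] => simp [triOK]
  | [a] => simp [triOK]
  | [a, b] => simp [triOK]
  | a :: b :: c :: r =>
    rw [triOK, Bool.and_eq_true, decide_eq_true_iff, triOK_iff (b :: c :: r)]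
    constructor
    · rintro ⟨h0, h⟩ i hi
      cases i with
      | zero => simpa using h0
      | succ j =>
        have := h j (by simpa using Nat.lt_of_succ_lt_succ hi)
        simpa using this
    · intro h
      refine ⟨by simpa using h 0 (by simp), fun j hj => ?_⟩
      have := h (j + 1) (by simpa using Nat.succ_lt_succ hj)
      simpa using this

-- B's run-length loop, with the state reached after a step from a to b, equals triOK
theorem waveRunB_eq_triOK (xs : List Int) : ∀ (a b : Int),
    waveRunB b (if a < b then 2 else 1) (if a > b then 2 else 1) xs = triOK (a :: b :: xs) := by
  induction xs with
  | nil => intro a b; simp [waveRunB, triOK]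
  | cons x r ih =>
    intro a b
    simp only [waveRunB]
    by_cases hfail : (a < b ∧ b < x) ∨ (a > b ∧ b > x)
    · have h3 : ((if x > b then (if a < b then (2:Int) else 1) + 1 else 1) ≥ 3 ∨
                 (if x < b then (if a > b then (2:Int) else 1) + 1 else 1) ≥ 3) := by
        rcases hfail with ⟨h1, h2⟩ | ⟨h1, h2⟩
        · left; rw [if_pos h2, if_pos h1]; omega
        · right; rw [if_pos h2, if_pos h1]; omega
      rw [if_pos h3, triOK]
      have hne : ¬ ((b ≤ a ∧ b ≤ x) ∨ (a ≤ b ∧ x ≤ b)) := by omega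
      simp [hne]
    · have h3 : ¬ ((if x > b then (if a < b then (2:Int) else 1) + 1 else 1) ≥ 3 ∨
                   (if x < b then (if a > b then (2:Int) else 1) + 1 else 1) ≥ 3) := by
        split_ifs <;> omega
      rw [if_neg h3]
      have hinc : (if x > b then (if a < b then (2:Int) else 1) + 1 else 1)
          = if b < x then 2 else 1 := by
        split_ifs <;> omega
      have hdec : (if x < b then (if a > b then (2:Int) else 1) + 1 else 1)
          = if b > x then 2 else 1 := by
        split_ifs <;> omega
      rw [hinc, hdec, ih b x]
      have hok : ((b ≤ a ∧ b ≤ x) ∨ (a ≤ b ∧ x ≤ b)) := by omega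
      rw [triOK]
      simp [hok]

-- B's loop from the initial (1,1) state: the first step can never fail
theorem waveRunB_start (p q : Int) (rest : List Int) :
    waveRunB p 1 1 (q :: rest) = triOK (p :: q :: rest) := by
  simp only [waveRunB]
  have h3 : ¬ ((if q > p then (1:Int) + 1 else 1) ≥ 3 ∨ (if q < p then (1:Int) + 1 else 1) ≥ 3) := by
    split_ifs <;> omega
  rw [if_neg h3]
  have hinc : (if q > p then (1:Int) + 1 else 1) = if p < q then 2 else 1 := by
    split_ifs <;> omega
  have hdec : (if q < p then (1:Int) + 1 else 1) = if p > q then 2 else 1 := by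
    split_ifs <;> omega
  rw [hinc, hdec, waveRunB_eq_triOK rest p q]

theorem check_wave_list_eq (lst : List Int) :
    check_wave_list lst = check_wave_list_alt lst := by
  unfold check_wave_list check_wave_list_alt
  split_ifs with hn
  · rfl
  · rw [not_lt] at hn
    have hlen : PySem.List.len lst = (lst.length : Int) := by simp [PySem.List.len]
    rw [hlen] at hn
    match lst, hn with
    | p :: q :: rest, hn =>
      dsimp only
      rw [waveRunB_start, checkWaveLoopA_eq_all, Bool.eq_iff_iff, triOK_iff]
      set L : List Int := p :: q :: rest with hL
      have hlen' : PySem.List.len L = (L.length : Int) := by simp [PySem.List.len]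
      simp only [List.all_eq_true, decide_eq_true_eq, PySem.List.mem_pyRange_one, hlen']
      constructor
      · intro H i hi
        have := H ((i : Int) + 1) ⟨by omega, by omega⟩
        rw [PySem.List.pyGetD_eq_getElem (i := (i : Int) + 1 - 1) L 0 (by omega) (by omega),
            PySem.List.pyGetD_eq_getElem (i := (i : Int) + 1) L 0 (by omega) (by omega),
            PySem.List.pyGetD_eq_getElem (i := (i : Int) + 1 + 1) L 0 (by omega) (by omega)] at this
        have e1 : ((i : Int) + 1 - 1).toNat = i := by omega
        have e2 : ((i : Int) + 1).toNat = i + 1 := by omega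
        have e3 : ((i : Int) + 1 + 1).toNat = i + 2 := by omega
        simp only [e1, e2, e3] at this
        tauto
      · intro H j hj
        obtain ⟨hj1, hj2⟩ := hj
        have := H (j - 1).toNat (by omega)
        rw [PySem.List.pyGetD_eq_getElem (i := j - 1) L 0 (by omega) (by omega),
            PySem.List.pyGetD_eq_getElem (i := j) L 0 (by omega) (by omega),
            PySem.List.pyGetD_eq_getElem (i := j + 1) L 0 (by omega) (by omega)]
        have e1 : (j - 1).toNat + 1 = j.toNat := by omega
        have e2 : (j - 1).toNat + 2 = (j + 1).toNat := by omega
        simp only [e1, e2] at this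
        simp only [ge_iff_le]
        tauto

-- ===== VERDICT =====
theorem check_wave_list_spec : Claim_equal_check_wave_list := by
  intro lst _
  exact check_wave_list_eq lst
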